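-- pv_equiv track=rewrite | github.com/alaiasolkobreslin/bril | examples/l8.py | def_dominates_all_uses
-- ===== SOURCE A (Python) =====
-- def def_dominates_all_uses(name2block, reverse_dominators, num2label, var, i):
--     i_block = num2label[i]
--     dominates = reverse_dominators[i_block]
--     uses = set()
--     for _, block in name2block.items():
--         for instr, j in block:
--             if 'args' in instr and var in instr['args']:
--                 # This is a use
--                 uses.add(num2label[j])
--     for use in uses:
--         if use not in dominates:
--             return False
--     return True
-- ===== SOURCE B (Python) =====
-- def def_dominates_all_uses(name2block, reverse_dominators, num2label, var, i):
--     dominates = set(reverse_dominators[num2label[i]])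
--     # Precompute, from num2label alone, the set of instruction NUMBERS whose block
--     # is not dominated by i's block; the scan then never consults num2label again.
--     bad = {j for j, lbl in num2label.items() if lbl not in dominates}
--     for block in name2block.values():
--         for instr, j in block:
--             if j in bad and 'args' in instr and var in instr['args']:
--                 return False
--     return True
-- ===== Notes on version B (the rewrite author's own statement) =====
-- stated objective: alternative
-- what changed: Instead of collecting the labels of all uses and checking them against the dominator set afterwards, B first inverts the problem: it precomputes from num2label the set of instruction numbers living in non-dominated blocks ('bad'), then makes a single early-exit scan that rejects as soon as var is used at a bad number - the per-instruction num2label lookup and the intermediate uses set both disappear.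
import Mathlib
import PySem

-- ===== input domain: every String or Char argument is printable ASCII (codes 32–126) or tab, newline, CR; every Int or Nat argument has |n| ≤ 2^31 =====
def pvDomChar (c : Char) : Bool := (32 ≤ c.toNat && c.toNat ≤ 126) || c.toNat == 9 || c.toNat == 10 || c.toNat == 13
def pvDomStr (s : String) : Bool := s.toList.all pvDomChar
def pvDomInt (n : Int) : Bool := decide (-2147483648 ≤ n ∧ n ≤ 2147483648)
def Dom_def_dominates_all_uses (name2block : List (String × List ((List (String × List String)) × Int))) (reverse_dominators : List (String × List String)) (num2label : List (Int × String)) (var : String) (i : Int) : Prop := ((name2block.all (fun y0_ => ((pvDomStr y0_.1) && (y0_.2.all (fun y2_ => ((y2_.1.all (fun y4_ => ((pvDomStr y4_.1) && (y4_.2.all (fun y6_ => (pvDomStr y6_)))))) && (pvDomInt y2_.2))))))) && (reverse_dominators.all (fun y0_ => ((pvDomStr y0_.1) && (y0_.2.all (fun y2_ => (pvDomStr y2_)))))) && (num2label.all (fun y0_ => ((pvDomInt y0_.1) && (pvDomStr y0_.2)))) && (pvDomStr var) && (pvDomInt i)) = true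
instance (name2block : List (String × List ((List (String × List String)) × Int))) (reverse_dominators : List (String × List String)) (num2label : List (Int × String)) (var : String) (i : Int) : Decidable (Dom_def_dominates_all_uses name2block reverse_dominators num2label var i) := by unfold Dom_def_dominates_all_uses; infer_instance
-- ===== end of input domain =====

-- header: B inverts A's direction — it precomputes the set of instruction numbers lying in
-- non-dominated blocks from num2label once, then does a single early-exit scan of the
-- instructions; return values proved equal on Pre_ (no argument is mutated).

-- ===== PORT A =====
-- first-match association-list lookup (Python dict lookup; exact when keys are duplicate-free, see Pre_)
def pvLookup? {kk vv : Type} [BEq kk] (d : List (kk × vv)) (k : kk) : Option vv :=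
  match d with
  | [] => none
  | (k', v) :: rest => if k' == k then some v else pvLookup? rest k

-- one step of A's first loop: 'if 'args' in instr and var in instr['args']: uses.add(num2label[j])'
-- (state 'none' models the KeyError num2label[j] would raise)
def pvStepA (num2label : List (Int × String)) (var : String)
    (acc : Option (PySem.Set String)) (q : (List (String × List String)) × Int) :
    Option (PySem.Set String) :=
  match acc with
  | none => none
  | some uses =>
    match pvLookup? q.1 "args" with
    | some args =>
      if args.contains var then
        match pvLookup? num2label q.2 with
        | some lbl => some (PySem.Set.add uses lbl)
        | none => none
      else some uses
    | none => some uses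

def def_dominates_all_uses (name2block : List (String × List ((List (String × List String)) × Int))) (reverse_dominators : List (String × List String)) (num2label : List (Int × String)) (var : String) (i : Int) : Bool :=
  match pvLookup? num2label i with
  | none => false              -- KeyError in Python (outside Pre_)
  | some i_block =>
    match pvLookup? reverse_dominators i_block with
    | none => false            -- KeyError in Python (outside Pre_)
    | some dominates =>
      match name2block.foldl (fun acc p => p.2.foldl (pvStepA num2label var) acc)
          (some PySem.Set.empty) with
      | none => false          -- KeyError in Python (outside Pre_)
      | some uses => uses.all (fun u => dominates.contains u)

-- ===== PORT B =====
-- 'bad = {j for j, lbl in num2label.items() if lbl not in dominates}'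
def pvBad (num2label : List (Int × String)) (domSet : PySem.Set String) : PySem.Set Int :=
  num2label.foldl (fun s p => if domSet.contains p.2 then s else PySem.Set.add s p.1)
    PySem.Set.empty

-- inner 'for instr, j in block: if j in bad and 'args' in instr and var in instr['args']: return False'
def pvScanBlock (bad : PySem.Set Int) (var : String) :
    List ((List (String × List String)) × Int) → Bool
  | [] => true
  | q :: rest =>
    if bad.contains q.2 then
      match pvLookup? q.1 "args" with
      | some args => if args.contains var then false else pvScanBlock bad var rest
      | none => pvScanBlock bad var rest
    else pvScanBlock bad var rest

-- outer 'for block in name2block.values()' (a returned False propagates out)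
def pvScanBlocks (bad : PySem.Set Int) (var : String) :
    List (String × List ((List (String × List String)) × Int)) → Bool
  | [] => true
  | p :: rest => if pvScanBlock bad var p.2 then pvScanBlocks bad var rest else false

def def_dominates_all_uses_alt (name2block : List (String × List ((List (String × List String)) × Int))) (reverse_dominators : List (String × List String)) (num2label : List (Int × String)) (var : String) (i : Int) : Bool :=
  match pvLookup? num2label i with
  | none => false              -- KeyError in Python (outside Pre_)
  | some i_block =>
    match pvLookup? reverse_dominators i_block with
    | none => false            -- KeyError in Python (outside Pre_)
    | some dominates =>
      pvScanBlocks (pvBad num2label (PySem.Set.ofList dominates)) var name2block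

-- ===== PRECONDITION & SPEC =====
-- Pre_ excludes (a) the inputs where Python A raises KeyError (i, the label of i, or the
-- block number j of some use missing from num2label) and (b) association lists with duplicate
-- keys, on which the Python-dict reading (last duplicate wins, keys collapsed) cannot be
-- matched by the insertion-order list representation; A still returns a value in case (b).
def Pre_def_dominates_all_uses (name2block : List (String × List ((List (String × List String)) × Int))) (reverse_dominators : List (String × List String)) (num2label : List (Int × String)) (var : String) (i : Int) : Prop :=
  i ∈ num2label.map Prod.fst ∧
  (∀ p ∈ num2label, p.1 = i → p.2 ∈ reverse_dominators.map Prod.fst) ∧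
  (∀ p ∈ name2block, ∀ q ∈ p.2, ∀ r ∈ q.1, r.1 = "args" → var ∈ r.2 →
      q.2 ∈ num2label.map Prod.fst) ∧
  (num2label.map Prod.fst).Nodup ∧
  (reverse_dominators.map Prod.fst).Nodup ∧
  (name2block.map Prod.fst).Nodup ∧
  (∀ p ∈ name2block, ∀ q ∈ p.2, (q.1.map Prod.fst).Nodup)
instance (name2block : List (String × List ((List (String × List String)) × Int))) (reverse_dominators : List (String × List String)) (num2label : List (Int × String)) (var : String) (i : Int) : Decidable (Pre_def_dominates_all_uses name2block reverse_dominators num2label var i) := by unfold Pre_def_dominates_all_uses; infer_instance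

def pvWitness_def_dominates_all_uses : (List (String × List ((List (String × List String)) × Int))) × (List (String × List String)) × (List (Int × String)) × String × Int :=
  ([("entry", [([("op", ["add"]), ("args", ["x"])], 1)])],
   [("L0", ["L0"]), ("L1", ["L0", "L1"])],
   [(0, "L0"), (1, "L1")],
   "x", 0)

def Spec_def_dominates_all_uses (name2block : List (String × List ((List (String × List String)) × Int))) (reverse_dominators : List (String × List String)) (num2label : List (Int × String)) (var : String) (i : Int) (out : Bool) : Prop := out = def_dominates_all_uses_alt name2block reverse_dominators num2label var i
instance (name2block : List (String × List ((List (String × List String)) × Int))) (reverse_dominators : List (String × List String)) (num2label : List (Int × String)) (var : String) (i : Int) (out : Bool) : Decidable (Spec_def_dominates_all_uses name2block reverse_dominators num2label var i out) := by unfold Spec_def_dominates_all_uses; infer_instance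

-- ===== CLAIM (what is proved, stated in full; the proofs are below) =====
def Claim_equal_def_dominates_all_uses : Prop := ∀ (name2block : List (String × List ((List (String × List String)) × Int))) (reverse_dominators : List (String × List String)) (num2label : List (Int × String)) (var : String) (i : Int), Dom_def_dominates_all_uses name2block reverse_dominators num2label var i → Pre_def_dominates_all_uses name2block reverse_dominators num2label var i → Spec_def_dominates_all_uses name2block reverse_dominators num2label var i (def_dominates_all_uses name2block reverse_dominators num2label var i)

-- ===== LEMMAS AND PROOFS =====

theorem pvWitness_ok :
    Dom_def_dominates_all_uses (pvWitness_def_dominates_all_uses.1) (pvWitness_def_dominates_all_uses.2.1) (pvWitness_def_dominates_all_uses.2.2.1) (pvWitness_def_dominates_all_uses.2.2.2.1) (pvWitness_def_dominates_all_uses.2.2.2.2) ∧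
    Pre_def_dominates_all_uses (pvWitness_def_dominates_all_uses.1) (pvWitness_def_dominates_all_uses.2.1) (pvWitness_def_dominates_all_uses.2.2.1) (pvWitness_def_dominates_all_uses.2.2.2.1) (pvWitness_def_dominates_all_uses.2.2.2.2) := by
  constructor <;> decide

-- the per-instruction predicate A's phase structure amounts to
def pvUseOk (num2label : List (Int × String)) (var : String) (dominates : List String)
    (q : (List (String × List String)) × Int) : Bool :=
  match pvLookup? q.1 "args" with
  | some args =>
    if args.contains var then
      match pvLookup? num2label q.2 with
      | some lbl => dominates.contains lbl
      | none => false
    else true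
  | none => true

-- the per-instruction predicate B's scan computes
def pvUseB (bad : PySem.Set Int) (var : String)
    (q : (List (String × List String)) × Int) : Bool :=
  if bad.contains q.2 then
    match pvLookup? q.1 "args" with
    | some args => !args.contains var
    | none => true
  else true

-- adding to a set preserves/records the predicate: all over (s.add x) = all s && p x
theorem set_add_all (s : PySem.Set String) (x : String) (p : String → Bool) :
    (PySem.Set.add s x).all p = (s.all p && p x) := by
  rw [PySem.Set.add_eq_ite]
  split_ifs with h
  · cases hall : s.all p with
    | false => simp
    | true =>
      have := (List.all_eq_true.mp hall) x h
      simp [this]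
  · simp [List.all_append]

-- nested foldl over blocks = foldl over the flattened instruction list
theorem foldl_nested (f : Option (PySem.Set String) → (List (String × List String)) × Int → Option (PySem.Set String))
    (l : List (String × List ((List (String × List String)) × Int))) (o : Option (PySem.Set String)) :
    l.foldl (fun acc p => p.2.foldl f acc) o = (l.flatMap (fun p => p.2)).foldl f o := by
  induction l generalizing o with
  | nil => rfl
  | cons a l ih => simp [List.flatMap_cons, List.foldl_append, ih]

-- once the fold state is dead (KeyError), it stays dead
theorem foldl_stepA_none (num2label : List (Int × String)) (var : String)
    (L : List ((List (String × List String)) × Int)) :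
    L.foldl (pvStepA num2label var) none = none := by
  induction L with
  | nil => rfl
  | cons q L ih =>
    rw [List.foldl_cons]
    have h : pvStepA num2label var none q = none := rfl
    rw [h]; exact ih

-- A's set-then-check equals the pointwise scan by pvUseOk, for any accumulator
theorem key_lemma_A (num2label : List (Int × String)) (var : String) (dominates : List String)
    (L : List ((List (String × List String)) × Int)) (acc : PySem.Set String) :
    (match L.foldl (pvStepA num2label var) (some acc) with
     | none => false
     | some uses => uses.all (fun u => dominates.contains u))
    = (acc.all (fun u => dominates.contains u) && L.all (pvUseOk num2label var dominates)) := by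
  induction L generalizing acc with
  | nil => simp
  | cons q L ih =>
    rw [List.foldl_cons, List.all_cons]
    cases hargs : pvLookup? q.1 "args" with
    | none =>
      have h1 : pvStepA num2label var (some acc) q = some acc := by
        simp only [pvStepA, hargs]
      have h2 : pvUseOk num2label var dominates q = true := by
        simp only [pvUseOk, hargs]
      rw [h1, ih, h2, Bool.true_and]
    | some args =>
      by_cases hv : args.contains var
      · cases hlbl : pvLookup? num2label q.2 with
        | none =>
          have h1 : pvStepA num2label var (some acc) q = none := by
            simp only [pvStepA, hargs, hv, if_true]; rw [hlbl]
          have h2 : pvUseOk num2label var dominates q = false := by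
            simp only [pvUseOk, hargs, hv, if_true]; rw [hlbl]
          rw [h1, foldl_stepA_none, h2, Bool.false_and, Bool.and_false]
        | some lbl =>
          have h1 : pvStepA num2label var (some acc) q = some (PySem.Set.add acc lbl) := by
            simp only [pvStepA, hargs, hv, if_true]; rw [hlbl]
          have h2 : pvUseOk num2label var dominates q = dominates.contains lbl := by
            simp only [pvUseOk, hargs, hv, if_true]; rw [hlbl]
          rw [h1, ih, set_add_all, h2, Bool.and_assoc]
      · have hv' : var ∉ args := by simpa using hv
        have h1 : pvStepA num2label var (some acc) q = some acc := by
          simp [pvStepA, hargs, hv']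
        have h2 : pvUseOk num2label var dominates q = true := by
          simp [pvUseOk, hargs, hv']
        rw [h1, ih, h2, Bool.true_and]

-- B's inner early-exit loop is the all of pvUseB
theorem scanBlock_eq_all (bad : PySem.Set Int) (var : String)
    (L : List ((List (String × List String)) × Int)) :
    pvScanBlock bad var L = L.all (pvUseB bad var) := by
  induction L with
  | nil => rfl
  | cons q L ih =>
    rw [List.all_cons]
    show (if bad.contains q.2 then
            match pvLookup? q.1 "args" with
            | some args => if args.contains var then false else pvScanBlock bad var L
            | none => pvScanBlock bad var L
          else pvScanBlock bad var L) = _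
    by_cases hb : bad.contains q.2
    · simp only [hb, if_true]
      cases hargs : pvLookup? q.1 "args" with
      | none =>
        have hU : pvUseB bad var q = true := by simp only [pvUseB, hb, if_true, hargs]
        rw [hU, Bool.true_and, ih]
      | some args =>
        by_cases hv : args.contains var
        · have hU : pvUseB bad var q = false := by
            simp only [pvUseB, hb, if_true, hargs, hv, Bool.not_true]
          have hvm : var ∈ args := by simpa using hv
          simp [hvm, hU]
        · have hU : pvUseB bad var q = true := by
            simp only [pvUseB, hb, if_true, hargs]
            simpa using hv
          have hvn : var ∉ args := by simpa using hv
          simp [hvn, hU, ih]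
    · have hU : pvUseB bad var q = true := by
        simp only [pvUseB, if_neg hb]
      rw [if_neg hb, hU, Bool.true_and, ih]

-- B's outer loop over blocks = all over the flattened instruction list
theorem scanBlocks_eq_all (bad : PySem.Set Int) (var : String)
    (l : List (String × List ((List (String × List String)) × Int))) :
    pvScanBlocks bad var l = (l.flatMap (fun p => p.2)).all (pvUseB bad var) := by
  induction l with
  | nil => rfl
  | cons p l ih =>
    show (if pvScanBlock bad var p.2 then pvScanBlocks bad var l else false) = _
    rw [List.flatMap_cons, List.all_append, scanBlock_eq_all, ih]
    cases p.2.all (pvUseB bad var) <;> simp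

-- membership in the bad-set fold, over any accumulator
theorem mem_bad_fold (domSet : PySem.Set String) (l : List (Int × String))
    (s : PySem.Set Int) (j : Int) :
    j ∈ l.foldl (fun s p => if domSet.contains p.2 then s else PySem.Set.add s p.1) s
      ↔ j ∈ s ∨ ∃ p ∈ l, p.1 = j ∧ domSet.contains p.2 = false := by
  induction l generalizing s with
  | nil => simp
  | cons a l ih =>
    rw [List.foldl_cons]
    by_cases hd : domSet.contains a.2
    · rw [if_pos hd, ih]
      constructor
      · rintro (h | ⟨p, hp, h⟩)
        · exact Or.inl h
        · exact Or.inr ⟨p, List.mem_cons_of_mem _ hp, h⟩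
      · rintro (h | ⟨p, hp, h⟩)
        · exact Or.inl h
        · rcases List.mem_cons.mp hp with rfl | hp'
          · rw [hd] at h; exact absurd h.2 (by simp)
          · exact Or.inr ⟨p, hp', h⟩
    · have hd' : domSet.contains a.2 = false := by simpa using hd
      rw [if_neg hd, ih]
      constructor
      · rintro (h | ⟨p, hp, h⟩)
        · rcases (PySem.Set.mem_add _ _ _).mp h with h' | rfl
          · exact Or.inl h'
          · exact Or.inr ⟨a, List.mem_cons_self, rfl, hd'⟩
        · exact Or.inr ⟨p, List.mem_cons_of_mem _ hp, h⟩
      · rintro (h | ⟨p, hp, h⟩)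
        · exact Or.inl ((PySem.Set.mem_add _ _ _).mpr (Or.inl h))
        · rcases List.mem_cons.mp hp with rfl | hp'
          · exact Or.inl ((PySem.Set.mem_add _ _ _).mpr (Or.inr h.1.symm))
          · exact Or.inr ⟨p, hp', h⟩

-- a key among the first components is found by pvLookup?
theorem lookup_isSome_of_mem_fst {kk vv : Type} [BEq kk] [LawfulBEq kk]
    (l : List (kk × vv)) (k : kk) (h : k ∈ l.map Prod.fst) :
    (pvLookup? l k).isSome = true := by
  induction l with
  | nil => simp at h
  | cons a l ih =>
    by_cases hk : a.1 == k
    · simp [pvLookup?, hk]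
    · rw [List.map_cons, List.mem_cons] at h
      rcases h with h | h
      · exact absurd (by simpa using h.symm) hk
      · simpa [pvLookup?, hk] using ih h

-- pvLookup? finds a pair of the list
theorem pvLookup?_mem {kk vv : Type} [BEq kk] [LawfulBEq kk] (l : List (kk × vv)) (k : kk) (v : vv)
    (h : pvLookup? l k = some v) : (k, v) ∈ l := by
  induction l with
  | nil => simp [pvLookup?] at h
  | cons a l ih =>
    by_cases hk : a.1 == k
    · have hv : some a.2 = some v := by simpa [pvLookup?, hk] using h
      have : a.2 = v := by injection hv
      have hke : a.1 = k := by simpa using hk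
      subst this; subst hke
      exact List.mem_cons_self
    · have h' : pvLookup? l k = some v := by simpa [pvLookup?, hk] using h
      exact List.mem_cons_of_mem _ (ih h')

-- with duplicate-free keys every pair keyed k carries the looked-up value
theorem pvLookup?_unique {kk vv : Type} [BEq kk] [LawfulBEq kk] (l : List (kk × vv)) (k : kk) (v : vv)
    (hnd : (l.map Prod.fst).Nodup) (h : pvLookup? l k = some v) :
    ∀ p ∈ l, p.1 = k → p.2 = v := by
  induction l with
  | nil => intro p hp; simp at hp
  | cons a l ih =>
    rw [List.map_cons, List.nodup_cons] at hnd
    intro p hp hpk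
    by_cases hk : a.1 == k
    · have hv : some a.2 = some v := by simpa [pvLookup?, hk] using h
      have hav : a.2 = v := by injection hv
      have hke : a.1 = k := by simpa using hk
      rcases List.mem_cons.mp hp with rfl | hp'
      · exact hav
      · exact absurd (hke ▸ hpk ▸ List.mem_map_of_mem hp') hnd.1
    · have h' : pvLookup? l k = some v := by simpa [pvLookup?, hk] using h
      rcases List.mem_cons.mp hp with rfl | hp'
      · exact absurd (by simpa using hpk) hk
      · exact ih hnd.2 h' p hp' hpk

-- membership in the precomputed bad set ↔ the looked-up label is not dominated
theorem mem_bad_iff (num2label : List (Int × String)) (domSet : PySem.Set String)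
    (j : Int) (lbl : String)
    (hnd : (num2label.map Prod.fst).Nodup) (hlk : pvLookup? num2label j = some lbl) :
    j ∈ pvBad num2label domSet ↔ domSet.contains lbl = false := by
  unfold pvBad
  rw [mem_bad_fold]
  constructor
  · rintro (h | ⟨p, hp, hpj, hpd⟩)
    · exact absurd h (by simp [PySem.Set.empty])
    · have := pvLookup?_unique num2label j lbl hnd hlk p hp hpj
      rwa [this] at hpd
  · intro h
    exact Or.inr ⟨(j, lbl), pvLookup?_mem num2label j lbl hlk, rfl, h⟩

-- Set.ofList membership as a Bool
theorem contains_ofList (xs : List String) (x : String) :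
    (PySem.Set.ofList xs).contains x = xs.contains x := by
  by_cases h : x ∈ xs <;> simp [PySem.Set.mem_ofList, h]

-- all respects pointwise equality on the members
theorem all_congr_mem {α : Type} (l : List α) (f g : α → Bool)
    (h : ∀ x ∈ l, f x = g x) : l.all f = l.all g := by
  induction l with
  | nil => rfl
  | cons a l ih =>
    rw [List.all_cons, List.all_cons, h a List.mem_cons_self,
      ih (fun x hx => h x (List.mem_cons_of_mem _ hx))]

-- pointwise agreement of the two per-instruction predicates under Pre_'s lookup guarantees
theorem useOk_eq_useB (num2label : List (Int × String)) (var : String) (dominates : List String)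
    (q : (List (String × List String)) × Int)
    (hnd : (num2label.map Prod.fst).Nodup)
    (hq : ∀ args, pvLookup? q.1 "args" = some args → var ∈ args →
        (pvLookup? num2label q.2).isSome = true) :
    pvUseOk num2label var dominates q
      = pvUseB (pvBad num2label (PySem.Set.ofList dominates)) var q := by
  unfold pvUseOk pvUseB
  cases hargs : pvLookup? q.1 "args" with
  | none =>
    by_cases hb : (pvBad num2label (PySem.Set.ofList dominates)).contains q.2 <;>
      simp
  | some args =>
    by_cases hv : args.contains var
    · have hvm : var ∈ args := by simpa using hv
      obtain ⟨lbl, hlbl⟩ := Option.isSome_iff_exists.mp (hq args hargs hvm)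
      rw [hlbl]
      have hmem := mem_bad_iff num2label (PySem.Set.ofList dominates) q.2 lbl hnd hlbl
      rw [contains_ofList] at hmem
      have hvm' : var ∈ args := by simpa using hv
      by_cases hin : q.2 ∈ pvBad num2label (PySem.Set.ofList dominates)
      · have hno : lbl ∉ dominates := by simpa using hmem.mp hin
        simp [hvm', hin, hno]
      · have hdt : dominates.contains lbl = true := by
          cases hdc : dominates.contains lbl with
          | true => rfl
          | false => exact absurd (hmem.mpr hdc) hin
        have hyes : lbl ∈ dominates := by simpa using hdt
        simp [hvm', hin, hyes]
    · have hv' : var ∉ args := by simpa using hv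
      by_cases hb : (pvBad num2label (PySem.Set.ofList dominates)).contains q.2 <;>
        simp [hv']

-- ===== VERDICT (by name: the statement is the Claim_ definition above) =====
theorem def_dominates_all_uses_spec : Claim_equal_def_dominates_all_uses := by
  intro name2block reverse_dominators num2label var i _ hpre
  obtain ⟨_, _, husemem, hnd, _⟩ := hpre
  have huse : ∀ p ∈ name2block, ∀ q ∈ p.2, ∀ args, pvLookup? q.1 "args" = some args →
      var ∈ args → (pvLookup? num2label q.2).isSome = true := by
    intro p hp q hq args hlk hvm
    exact lookup_isSome_of_mem_fst num2label q.2
      (husemem p hp q hq ("args", args) (pvLookup?_mem q.1 "args" args hlk) rfl hvm)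
  unfold Spec_def_dominates_all_uses def_dominates_all_uses def_dominates_all_uses_alt
  cases h1 : pvLookup? num2label i with
  | none => rfl
  | some i_block =>
    cases h2 : pvLookup? reverse_dominators i_block with
    | none => simp only [h2]
    | some dominates =>
      simp only [h2]
      show (match name2block.foldl (fun acc p => p.2.foldl (pvStepA num2label var) acc)
              (some PySem.Set.empty) with
            | none => false
            | some uses => uses.all (fun u => dominates.contains u))
          = pvScanBlocks (pvBad num2label (PySem.Set.ofList dominates)) var name2block
      rw [foldl_nested, scanBlocks_eq_all]
      have hA := key_lemma_A num2label var dominates (name2block.flatMap (fun p => p.2)) PySem.Set.empty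
      rw [hA]
      have hacc : (PySem.Set.empty : PySem.Set String).all (fun u => dominates.contains u) = true := rfl
      rw [hacc, Bool.true_and]
      exact all_congr_mem _ _ _ (fun q hqmem => by
        obtain ⟨p, hp, hq⟩ := List.mem_flatMap.mp hqmem
        exact useOk_eq_useB num2label var dominates q hnd (huse p hp q hq))
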